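-- pv_equiv track=rewrite | github.com/Kevins-repos/ENGRLabs | unit 10/no_three_in_a_line.py | no_three_in_line
-- ===== SOURCE A (Python) =====
-- def are_collinear(p1, p2, p3):
--     """
--     Check if three points p1, p2, p3 are collinear using the area of the triangle.
--     If the area is 0, the points are collinear.
--     """
--     return (p1[0] * (p2[1] - p3[1]) +
--             p2[0] * (p3[1] - p1[1]) +
--             p3[0] * (p1[1] - p2[1])) == 0
--
-- def no_three_in_line(n):
--     """
--     Find the largest set of points in an n x n grid such that no three points are collinear.
--     """
--     points = [(i, j) for i in range(n) for j in range(n)]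
--     selected_points = []
--
--     for point in points:
--         is_valid = True
--
--         # Manually checking all pairs of selected points
--         for i in range(len(selected_points)):
--             for j in range(i + 1, len(selected_points)):
--                 p1 = selected_points[i]
--                 p2 = selected_points[j]
--
--                 if are_collinear(p1, p2, point):
--                     is_valid = False
--                     break
--             if not is_valid:
--                 break
--
--         if is_valid:
--             selected_points.append(point)
--
--     return selected_points
-- ===== SOURCE B (Python) =====
-- def _gcd(a, b):
--     while b:
--         a, b = b, a % b
--     return a
--
-- def no_three_in_line(n):
--     """Greedy scan of the n x n grid; a candidate is rejected iff two already
--     selected points give the same normalized direction from it (duplicate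
--     direction = three points on one line)."""
--     selected = []
--     for i in range(n):
--         for j in range(n):
--             dirs = set()
--             ok = True
--             for (x, y) in selected:
--                 dx, dy = x - i, y - j
--                 g = _gcd(abs(dx), abs(dy))
--                 dx, dy = dx // g, dy // g
--                 if dx < 0 or (dx == 0 and dy < 0):
--                     dx, dy = -dx, -dy
--                 if (dx, dy) in dirs:
--                     ok = False
--                     break
--                 dirs.add((dx, dy))
--             if ok:
--                 selected.append((i, j))
--     return selected
-- ===== Notes on version B (the rewrite author's own statement) =====
-- stated objective: faster
-- what changed: Instead of testing every pair of already-selected points for collinearity with the candidate (quadratic per candidate), B hashes the gcd-normalized direction from the candidate to each selected point into a set; the candidate is rejected iff a direction repeats, making the check linear per candidate.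
import Mathlib
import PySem

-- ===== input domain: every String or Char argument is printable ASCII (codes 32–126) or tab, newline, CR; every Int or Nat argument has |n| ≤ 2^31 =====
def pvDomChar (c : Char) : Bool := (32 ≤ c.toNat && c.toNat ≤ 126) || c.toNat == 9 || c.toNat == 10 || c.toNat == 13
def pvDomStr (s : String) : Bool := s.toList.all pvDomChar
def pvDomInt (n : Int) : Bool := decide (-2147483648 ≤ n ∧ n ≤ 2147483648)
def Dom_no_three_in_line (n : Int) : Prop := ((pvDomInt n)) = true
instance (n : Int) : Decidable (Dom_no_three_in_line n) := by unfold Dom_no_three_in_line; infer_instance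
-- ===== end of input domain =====

-- B replaces A's per-candidate pairwise collinearity scan by a set of gcd-normalized
-- directions from the candidate to each selected point (duplicate direction = collinear);
-- objective: faster (quadratic → linear work per candidate).

-- ===== PORT A =====
def are_collinear (p1 p2 p3 : Int × Int) : Bool :=
  (p1.1 * (p2.2 - p3.2) + p2.1 * (p3.2 - p1.2) + p3.1 * (p1.2 - p2.2)) == 0

-- inner 'for j in range(i+1, len(selected_points))' loop with its break
def aJloop (sel : List (Int × Int)) (pt p1 : Int × Int) (j : Nat) : Bool :=
  if h : j < sel.length then
    if are_collinear p1 sel[j] pt then false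
    else aJloop sel pt p1 (j + 1)
  else true
termination_by sel.length - j

-- outer 'for i in range(len(selected_points))' loop with its break
def aIloop (sel : List (Int × Int)) (pt : Int × Int) (i : Nat) : Bool :=
  if h : i < sel.length then
    if aJloop sel pt sel[i] (i + 1) then aIloop sel pt (i + 1)
    else false
  else true
termination_by sel.length - i

def no_three_in_line (n : Int) : List (Int × Int) :=
  let points := (PySem.List.pyRange 0 n 1).flatMap
      (fun i => (PySem.List.pyRange 0 n 1).map (fun j => (i, j)))
  points.foldl (fun sel pt => if aIloop sel pt 0 then sel ++ [pt] else sel) []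

-- ===== PORT B =====
-- Source B's hand-written Euclid  'while b: a, b = b, a % b'
def bgcd (a b : Nat) : Nat :=
  if h : b = 0 then a else bgcd b (a % b)
termination_by b
decreasing_by exact Nat.mod_lt _ (Nat.pos_of_ne_zero h)

-- normalized direction from candidate (i, j) to q
def bnorm (i j : Int) (q : Int × Int) : Int × Int :=
  let dx := q.1 - i
  let dy := q.2 - j
  let g : Int := (bgcd dx.natAbs dy.natAbs : Int)
  let dx' := PySem.Int.floordiv dx g
  let dy' := PySem.Int.floordiv dy g
  if dx' < 0 ∨ (dx' = 0 ∧ dy' < 0) then (-dx', -dy') else (dx', dy')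

-- 'for (x, y) in selected: … if (dx, dy) in dirs: break; dirs.add((dx, dy))'
def bLoop (i j : Int) (sel : List (Int × Int)) (dirs : PySem.Set (Int × Int)) : Bool :=
  match sel with
  | [] => true
  | q :: rest =>
    let d := bnorm i j q
    if PySem.Set.contains dirs d then false
    else bLoop i j rest (PySem.Set.add dirs d)

def no_three_in_line_alt (n : Int) : List (Int × Int) :=
  (PySem.List.pyRange 0 n 1).foldl (fun sel i =>
    (PySem.List.pyRange 0 n 1).foldl (fun sel j =>
      if bLoop i j sel PySem.Set.empty then sel ++ [(i, j)] else sel) sel) []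

-- ===== PRECONDITION & SPEC =====
def Spec_no_three_in_line (n : Int) (out : List (Int × Int)) : Prop := out = no_three_in_line_alt n
instance (n : Int) (out : List (Int × Int)) : Decidable (Spec_no_three_in_line n out) := by unfold Spec_no_three_in_line; infer_instance

-- ===== CLAIM (what is proved, stated in full; the proofs are below) =====
def Claim_equal_no_three_in_line : Prop := ∀ (n : Int), Dom_no_three_in_line n → Spec_no_three_in_line n (no_three_in_line n)

-- ===== LEMMAS AND PROOFS =====

-- sign normalization, proof-side mirror of the final 'if' of bnorm
def pvSgn (x y : Int) : Int × Int :=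
  if x < 0 ∨ (x = 0 ∧ y < 0) then (-x, -y) else (x, y)

-- proof-side mirror of bnorm on the difference vector, via Int.gcd and exact division
def pvPn (a b : Int) : Int × Int :=
  pvSgn (a / (Int.gcd a b : Int)) (b / (Int.gcd a b : Int))

lemma bgcd_eq (a b : Nat) : bgcd a b = Nat.gcd a b := by
  induction b using Nat.strong_induction_on generalizing a with
  | _ b ih =>
    rw [bgcd]
    split
    · simp [*]
    · rename_i h
      rw [ih (a % b) (Nat.mod_lt _ (Nat.pos_of_ne_zero h)),
        Nat.gcd_comm b (a % b), ← Nat.gcd_rec, Nat.gcd_comm]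

lemma bnorm_eq_pvPn (i j : Int) (q : Int × Int) (h : q ≠ (i, j)) :
    bnorm i j q = pvPn (q.1 - i) (q.2 - j) := by
  have hne : ¬(q.1 - i = 0 ∧ q.2 - j = 0) := by
    rintro ⟨h1, h2⟩
    exact h (Prod.ext_iff.mpr ⟨by omega, by omega⟩)
  have hgpos : 0 < Int.gcd (q.1 - i) (q.2 - j) := Int.gcd_pos_iff.mpr (by tauto)
  simp only [bnorm, pvPn, pvSgn, bgcd_eq]
  have hg : Nat.gcd (q.1 - i).natAbs (q.2 - j).natAbs = Int.gcd (q.1 - i) (q.2 - j) := rfl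
  rw [hg, PySem.Int.floordiv_eq_ediv_of_pos (by exact_mod_cast hgpos),
    PySem.Int.floordiv_eq_ediv_of_pos (by exact_mod_cast hgpos)]

lemma pvPn_scalar (a b : Int) :
    ∃ e : Int, a = e * (pvPn a b).1 ∧ b = e * (pvPn a b).2 := by
  by_cases hg : Int.gcd a b = 0
  · have h0 := Int.gcd_eq_zero_iff.mp hg
    exact ⟨0, by simp [h0.1], by simp [h0.2]⟩
  · have h1 : a / (Int.gcd a b : Int) * (Int.gcd a b : Int) = a := Int.ediv_mul_cancel (Int.gcd_dvd_left _ _)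
    have h2 : b / (Int.gcd a b : Int) * (Int.gcd a b : Int) = b := Int.ediv_mul_cancel (Int.gcd_dvd_right _ _)
    unfold pvPn pvSgn
    split_ifs
    · exact ⟨-(Int.gcd a b : Int), by rw [neg_mul_neg, mul_comm, h1], by rw [neg_mul_neg, mul_comm, h2]⟩
    · exact ⟨(Int.gcd a b : Int), by rw [mul_comm, h1], by rw [mul_comm, h2]⟩

lemma pvSgn_neg (x y : Int) (h : ¬(x = 0 ∧ y = 0)) : pvSgn (-x) (-y) = pvSgn x y := by
  unfold pvSgn
  split_ifs <;> simp_all [Prod.ext_iff] <;> omega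

lemma prim_parallel (a b c d : Int) (hab : Int.gcd a b = 1) (hcd : Int.gcd c d = 1)
    (h : a * d - b * c = 0) : (a, b) = (c, d) ∨ (a, b) = (-c, -d) := by
  have h' : a * d = b * c := by linarith
  have hab' : IsCoprime a b := Int.isCoprime_iff_gcd_eq_one.mpr hab
  have hcd' : IsCoprime c d := Int.isCoprime_iff_gcd_eq_one.mpr hcd
  have hac : a ∣ c := hab'.dvd_of_dvd_mul_left (h' ▸ dvd_mul_right a d)
  have hcad : c ∣ a * d := by rw [h']; exact dvd_mul_left c b
  have hca : c ∣ a := hcd'.dvd_of_dvd_mul_left (by rwa [mul_comm] at hcad)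
  have hnab := Nat.dvd_antisymm (Int.natAbs_dvd_natAbs.mpr hac) (Int.natAbs_dvd_natAbs.mpr hca)
  by_cases ha : a = 0
  · -- then c = 0 and |b| = |d| = 1
    have hc : c = 0 := by omega
    subst ha; subst hc
    have hb1 : b.natAbs = 1 := by simpa using hab
    have hd1 : d.natAbs = 1 := by simpa using hcd
    have hb : b = 1 ∨ b = -1 := by omega
    have hd : d = 1 ∨ d = -1 := by omega
    rcases hb with rfl | rfl
    all_goals rcases hd with rfl | rfl
    all_goals decide
  · rcases Int.natAbs_eq_natAbs_iff.mp hnab with he | he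
    · subst he
      have hd : d = b := by
        have h2 : a * d = a * b := by linarith [h']
      -- placeholder, fixed below
        exact mul_left_cancel₀ ha h2
      subst hd; exact Or.inl rfl
    · have hd : d = -b := by
        have h2 : a * d = a * (-b) := by rw [h', he]; ring
        exact mul_left_cancel₀ ha h2
      subst hd
      right
      rw [Prod.ext_iff]
      exact ⟨by simp; omega, by simp⟩

lemma cross_iff (a b c d : Int) (hab : ¬(a = 0 ∧ b = 0)) (hcd : ¬(c = 0 ∧ d = 0)) :
    (a * d - b * c = 0) ↔ pvPn a b = pvPn c d := by
  constructor
  · intro h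
    have hg1pos : 0 < Int.gcd a b := Int.gcd_pos_iff.mpr (by tauto)
    have hg2pos : 0 < Int.gcd c d := Int.gcd_pos_iff.mpr (by tauto)
    set g1 : Int := (Int.gcd a b : Int) with hg1def
    set g2 : Int := (Int.gcd c d : Int) with hg2def
    have ha : a / g1 * g1 = a := Int.ediv_mul_cancel (Int.gcd_dvd_left _ _)
    have hb : b / g1 * g1 = b := Int.ediv_mul_cancel (Int.gcd_dvd_right _ _)
    have hc : c / g2 * g2 = c := Int.ediv_mul_cancel (Int.gcd_dvd_left _ _)
    have hd : d / g2 * g2 = d := Int.ediv_mul_cancel (Int.gcd_dvd_right _ _)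
    have h2 : g1 * g2 * (a / g1 * (d / g2) - b / g1 * (c / g2)) = 0 := by
      linear_combination h + ((d / g2) * g2) * ha - ((c / g2) * g2) * hb - b * hc + a * hd
    have hg1ne : g1 ≠ 0 := by rw [hg1def]; exact_mod_cast hg1pos.ne'
    have hg2ne : g2 ≠ 0 := by rw [hg2def]; exact_mod_cast hg2pos.ne'
    have hcross : a / g1 * (d / g2) - b / g1 * (c / g2) = 0 := by
      rcases mul_eq_zero.mp h2 with h3 | h3
      · rcases mul_eq_zero.mp h3 with h4 | h4 <;> [exact absurd h4 hg1ne; exact absurd h4 hg2ne]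
      · exact h3
    have hp1 : Int.gcd (a / g1) (b / g1) = 1 := Int.gcd_div_gcd_div_gcd hg1pos
    have hp2 : Int.gcd (c / g2) (d / g2) = 1 := Int.gcd_div_gcd_div_gcd hg2pos
    have hcd0 : ¬(c / g2 = 0 ∧ d / g2 = 0) := by
      rintro ⟨h5, h6⟩
      rw [h5] at hc; rw [h6] at hd
      simp at hc hd
      exact hcd ⟨hc.symm, hd.symm⟩
    rcases prim_parallel _ _ _ _ hp1 hp2 hcross with he | he
    · unfold pvPn pvSgn
      rw [← hg1def, ← hg2def]
      injection he with he1 he2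
      rw [he1, he2]
    · unfold pvPn
      rw [← hg1def, ← hg2def]
      injection he with he1 he2
      rw [he1, he2]
      exact pvSgn_neg _ _ hcd0
  · intro h
    obtain ⟨e1, he1a, he1b⟩ := pvPn_scalar a b
    obtain ⟨e2, he2c, he2d⟩ := pvPn_scalar c d
    rw [← h] at he2c he2d
    linear_combination d * he1a - c * he1b - (e1 * (pvPn a b).2) * he2c + (e1 * (pvPn a b).1) * he2d

lemma collinear_iff_bnorm (p q pt : Int × Int) (hp : p ≠ pt) (hq : q ≠ pt) :
    (are_collinear p q pt = true ↔ bnorm pt.1 pt.2 p = bnorm pt.1 pt.2 q) := by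
  have hp' : ¬(p.1 - pt.1 = 0 ∧ p.2 - pt.2 = 0) := by
    rintro ⟨h1, h2⟩; exact hp (Prod.ext_iff.mpr ⟨by omega, by omega⟩)
  have hq' : ¬(q.1 - pt.1 = 0 ∧ q.2 - pt.2 = 0) := by
    rintro ⟨h1, h2⟩; exact hq (Prod.ext_iff.mpr ⟨by omega, by omega⟩)
  rw [bnorm_eq_pvPn _ _ _ hp, bnorm_eq_pvPn _ _ _ hq,
    ← cross_iff _ _ _ _ hp' hq']
  unfold are_collinear
  rw [beq_iff_eq]
  have key : p.1 * (q.2 - pt.2) + q.1 * (pt.2 - p.2) + pt.1 * (p.2 - q.2)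
      = (p.1 - pt.1) * (q.2 - pt.2) - (p.2 - pt.2) * (q.1 - pt.1) := by ring
  rw [key]

lemma aJloop_eq (sel : List (Int × Int)) (pt p1 : Int × Int) (j : Nat) :
    aJloop sel pt p1 j = (sel.drop j).all (fun q => !are_collinear p1 q pt) := by
  fun_induction aJloop with
  | case1 j h hcol =>
    rw [← List.getElem_cons_drop h]
    simp only [List.all_cons, hcol, Bool.not_true, Bool.false_and]
  | case2 j h hcol ih =>
    simp only [Bool.not_eq_true] at hcol
    rw [ih, ← List.getElem_cons_drop h, List.all_cons, hcol]
    simp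
  | case3 j h =>
    rw [List.drop_eq_nil_of_le (le_of_not_gt h)]
    simp

lemma aIloop_iff (sel : List (Int × Int)) (pt : Int × Int) (i : Nat) :
    aIloop sel pt i = true ↔ (sel.drop i).Pairwise (fun p q => ¬ are_collinear p q pt = true) := by
  fun_induction aIloop with
  | case1 i h hJ ih =>
    rw [← List.getElem_cons_drop h, List.pairwise_cons]
    have hall := aJloop_eq sel pt sel[i] (i + 1)
    rw [hJ] at hall
    have h1 : ∀ q ∈ sel.drop (i + 1), ¬ are_collinear sel[i] q pt = true := by
      intro q hq
      have := List.all_eq_true.mp hall.symm q hq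
      simpa using this
    exact ⟨fun hrec => ⟨h1, ih.mp hrec⟩, fun hh => ih.mpr hh.2⟩
  | case2 i h hJ =>
    rw [← List.getElem_cons_drop h, List.pairwise_cons]
    simp only [Bool.not_eq_true] at hJ
    have hall := aJloop_eq sel pt sel[i] (i + 1)
    rw [hJ] at hall
    have hno : ¬ ∀ q ∈ sel.drop (i + 1), ¬ are_collinear sel[i] q pt = true := by
      intro hforall
      have hallT : (sel.drop (i + 1)).all (fun q => !are_collinear sel[i] q pt) = true := by
        rw [List.all_eq_true]
        intro q hq
        simpa using hforall q hq
      rw [← hall] at hallT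
      exact Bool.false_ne_true hallT
    constructor
    · intro hh; exact absurd hh (by simp)
    · rintro ⟨h1, _⟩; exact absurd h1 hno
  | case3 i h =>
    rw [List.drop_eq_nil_of_le (le_of_not_gt h)]
    simp

lemma bLoop_iff (i j : Int) (sel : List (Int × Int)) (dirs : PySem.Set (Int × Int)) :
    bLoop i j sel dirs = true ↔
      ((sel.map (bnorm i j)).Nodup ∧ ∀ q ∈ sel, bnorm i j q ∉ dirs) := by
  induction sel generalizing dirs with
  | nil => simp [bLoop]
  | cons q rest ih =>
    simp only [bLoop]
    by_cases hd : bnorm i j q ∈ dirs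
    · have hct : PySem.Set.contains dirs (bnorm i j q) = true := (PySem.Set.contains_iff dirs _).mpr hd
      rw [if_pos hct]
      simp [hd]
    · have hcf : ¬ PySem.Set.contains dirs (bnorm i j q) = true :=
        fun hcc => hd ((PySem.Set.contains_iff dirs _).mp hcc)
      rw [if_neg hcf, ih]
      simp only [List.map_cons, List.nodup_cons, List.forall_mem_cons, PySem.Set.mem_add,
        not_or, List.mem_map, not_exists, not_and]
      constructor
      · rintro ⟨hnd, hall⟩
        exact ⟨⟨fun r hr hre => (hall r hr).2 hre, hnd⟩, ⟨hd, fun r hr => (hall r hr).1⟩⟩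
      · rintro ⟨⟨hq, hnd⟩, _, hall⟩
        exact ⟨hnd, fun r hr => ⟨hall r hr, fun hre => hq r hr hre⟩⟩

lemma check_eq (sel : List (Int × Int)) (pt : Int × Int) (hpt : pt ∉ sel) :
    aIloop sel pt 0 = bLoop pt.1 pt.2 sel PySem.Set.empty := by
  rw [Bool.eq_iff_iff, aIloop_iff, bLoop_iff, List.drop_zero]
  have hmemne : ∀ p ∈ sel, p ≠ pt := fun p hp hep => hpt (hep ▸ hp)
  constructor
  · intro hpw
    refine ⟨?_, by simp [PySem.Set.empty]⟩
    rw [List.Nodup, List.pairwise_map]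
    refine hpw.imp_of_mem ?_
    intro a b hat hbt hr heq
    exact hr ((collinear_iff_bnorm a b pt (hmemne a hat) (hmemne b hbt)).mpr heq)
  · rintro ⟨hnd, _⟩
    rw [List.Nodup, List.pairwise_map] at hnd
    refine hnd.imp_of_mem ?_
    intro a b hat hbt hr hcol
    exact hr ((collinear_iff_bnorm a b pt (hmemne a hat) (hmemne b hbt)).mp hcol)

lemma fold_eq (ps : List (Int × Int)) (sel : List (Int × Int)) (hnd : ps.Nodup)
    (hdisj : ∀ q ∈ sel, q ∉ ps) :
    ps.foldl (fun sel pt => if aIloop sel pt 0 then sel ++ [pt] else sel) sel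
      = ps.foldl (fun sel pt => if bLoop pt.1 pt.2 sel PySem.Set.empty then sel ++ [pt] else sel) sel := by
  induction ps generalizing sel with
  | nil => rfl
  | cons pt rest ih =>
    simp only [List.foldl_cons]
    rw [check_eq sel pt (fun h => hdisj pt h List.mem_cons_self)]
    have hnd' := List.nodup_cons.mp hnd
    have hdisj' : ∀ q ∈ sel ++ [pt], q ∉ rest := by
      intro q hq
      rcases List.mem_append.mp hq with hq | hq
      · exact fun hr => hdisj q hq (List.mem_cons_of_mem _ hr)
      · rw [List.mem_singleton.mp hq]; exact hnd'.1
    cases hcb : bLoop pt.1 pt.2 sel PySem.Set.empty with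
    | true =>
      exact ih (sel ++ [pt]) hnd'.2 hdisj'
    | false =>
      exact ih sel hnd'.2 (fun q hq => fun hr => hdisj q hq (List.mem_cons_of_mem _ hr))

lemma foldl_flatMap' {α β γ : Type} (l : List α) (f : α → List β) (g : γ → β → γ) (init : γ) :
    (l.flatMap f).foldl g init = l.foldl (fun acc x => (f x).foldl g acc) init := by
  induction l generalizing init with
  | nil => rfl
  | cons x xs ih => simp [List.foldl_append, ih]

lemma grid_nodup (n : Int) :
    ((PySem.List.pyRange 0 n 1).flatMap
      (fun i => (PySem.List.pyRange 0 n 1).map (fun j => (i, j)))).Nodup := by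
  rw [List.nodup_flatMap]
  constructor
  · intro x _
    exact (PySem.List.nodup_pyRange_one 0 n).map (fun a b h => by simpa using h)
  · refine List.Pairwise.imp ?_ (PySem.List.nodup_pyRange_one 0 n)
    intro x y hxy a ha hb
    simp only [List.mem_map] at ha hb
    obtain ⟨jx, _, rfl⟩ := ha
    obtain ⟨jy, _, he⟩ := hb
    exact hxy (congrArg Prod.fst he).symm

-- ===== VERDICT (by name: the statement is the Claim_ definition above) =====
theorem no_three_in_line_spec : Claim_equal_no_three_in_line := by
  intro n _
  unfold Spec_no_three_in_line no_three_in_line no_three_in_line_alt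
  rw [fold_eq _ [] (grid_nodup n) (by simp), foldl_flatMap']
  simp only [List.foldl_map]
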